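-- pv_equiv track=rewrite | github.com/AtoyanMikhail/CaAA | lab4/src/find_cyclic_shift.py | find_cyclic_shift
-- ===== SOURCE A (Python) =====
-- def compute_prefix(pattern):
--     n = len(pattern)
--     pi = [0] * n
--     j = 0
--     for i in range(1, n):
--         while j > 0 and pattern[i] != pattern[j]:
--             j = pi[j - 1]
--         if pattern[i] == pattern[j]:
--             j += 1
--             pi[i] = j
--         else:
--             pi[i] = 0
--     return pi
--
-- def find_cyclic_shift(a, b):
--     if len(a) != len(b):
--         return -1
--     n = len(a)
--     if n == 0:
--         return 0
--     if a == b: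
--         return 0
--
--     pi = compute_prefix(a)
--     j = 0
--     for i in range(2 * n):
--         current_char = b[i % n]
--         while j > 0 and current_char != a[j]:
--             j = pi[j - 1]
--         if current_char == a[j]:
--             j += 1
--         if j == n:
--             start_index = i - n + 1
--             if 0 <= start_index < n:
--                 return (n - start_index) % n
--     return -1
-- ===== SOURCE B (Python) =====
-- def find_cyclic_shift(a, b):
--     if len(a) != len(b):
--         return -1
--     n = len(a)
--     if n == 0:
--         return 0
--     for s in range(n):
--         if all(a[t] == b[(s + t) % n] for t in range(n)):
--             return (n - s) % n
--     return -1
-- ===== Notes on version B (the rewrite author's own statement) =====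
-- stated objective: simpler
-- what changed: Replaces the KMP machinery (prefix-function computation plus a stateful scan over the doubled string) with a direct brute-force rotation search: for each start index s, check characterwise that a[t] == b[(s+t)%n] for all t, and return (n-s)%n on the first fully matching s.
import Mathlib
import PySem

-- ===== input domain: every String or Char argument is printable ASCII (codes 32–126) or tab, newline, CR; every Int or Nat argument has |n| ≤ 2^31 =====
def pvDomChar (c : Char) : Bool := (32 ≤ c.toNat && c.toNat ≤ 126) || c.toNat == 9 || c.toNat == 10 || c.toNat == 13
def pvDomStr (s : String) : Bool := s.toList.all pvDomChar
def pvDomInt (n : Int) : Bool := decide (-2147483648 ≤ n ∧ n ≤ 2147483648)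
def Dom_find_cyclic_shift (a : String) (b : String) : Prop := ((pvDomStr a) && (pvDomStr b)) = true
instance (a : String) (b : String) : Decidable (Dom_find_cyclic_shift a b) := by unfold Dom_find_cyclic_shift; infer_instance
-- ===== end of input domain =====

-- B replaces A's hand-rolled KMP (prefix function + scan over the doubled string) with a direct
-- brute-force rotation search (for each s, check a[t] == b[(s+t)%n] for all t); objective: simpler.
-- Proved equal on all inputs.

-- ===== PORT A =====
-- the 'while j > 0 and c != pattern[j]' loop shared by both of A's loops; fuel = initial j
-- (each iteration strictly decreases j, so fuel j is exact; Python never reads pattern[j] out of range here)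
def kmpWhile (p : List Char) (pi : List Nat) (c : Char) : Nat → Nat → Nat
  | 0, j => j
  | fuel+1, j => if 0 < j ∧ c ≠ p.getD j ' ' then kmpWhile p pi c fuel (pi.getD (j-1) 0) else j

def compute_prefix (p : List Char) : List Nat :=
  let n := p.length
  ((List.range' 1 (n-1)).foldl (fun (st : List Nat × Nat) i =>
    let c := p.getD i ' '
    let j := kmpWhile p st.1 c st.2 st.2
    if c = p.getD j ' ' then (st.1.set i (j+1), j+1) else (st.1.set i 0, j))
    (List.replicate n 0, 0)).1

def kmpScan (p bl : List Char) (pi : List Nat) (n : Nat) : Nat → Nat → Nat → Int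
  | 0, _, _ => -1
  | steps+1, i, j =>
    let c := bl.getD (i % n) ' '
    let j1 := kmpWhile p pi c j j
    let j2 := if c = p.getD j1 ' ' then j1 + 1 else j1
    if j2 = n then
      let start : Int := (i : Int) - (n : Int) + 1
      if 0 ≤ start ∧ start < (n : Int) then PySem.Int.mod ((n : Int) - start) (n : Int)
      else kmpScan p bl pi n steps (i+1) j2
    else kmpScan p bl pi n steps (i+1) j2

def find_cyclic_shift (a : String) (b : String) : Int :=
  let al := a.toList
  let bl := b.toList
  if al.length ≠ bl.length then -1
  else
    let n := al.length
    if n = 0 then 0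
    else if al = bl then 0
    else kmpScan al bl (compute_prefix al) n (2*n) 0 0

-- ===== PORT B =====
-- 'for s in range(n): if all(a[t] == b[(s+t)%n] for t in range(n)): return (n-s)%n' with early
-- return, as a fuel recursion; a[t] / b[(s+t)%n] with indices provably in range are getD.
def rotLoop (al bl : List Char) (n : Nat) : Nat → Nat → Int
  | 0, _ => -1
  | fuel+1, s =>
    if (List.range n).all (fun t => al.getD t ' ' == bl.getD ((s + t) % n) ' ') then
      PySem.Int.mod ((n : Int) - (s : Int)) (n : Int)
    else rotLoop al bl n fuel (s+1)

def find_cyclic_shift_alt (a : String) (b : String) : Int :=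
  let al := a.toList
  let bl := b.toList
  if al.length ≠ bl.length then -1
  else
    let n := al.length
    if n = 0 then 0
    else rotLoop al bl n n 0

-- ===== PRECONDITION & SPEC =====
def Spec_find_cyclic_shift (a : String) (b : String) (out : Int) : Prop := out = find_cyclic_shift_alt a b
instance (a : String) (b : String) (out : Int) : Decidable (Spec_find_cyclic_shift a b out) := by unfold Spec_find_cyclic_shift; infer_instance

-- ===== CLAIM (what is proved, stated in full; the proofs are below) =====
def Claim_equal_find_cyclic_shift : Prop := ∀ (a : String) (b : String), Dom_find_cyclic_shift a b → Spec_find_cyclic_shift a b (find_cyclic_shift a b)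

-- ===== LEMMAS AND PROOFS =====

-- length of the longest prefix of p that is a suffix of t (the KMP automaton state)
def okK (p t : List Char) : Nat := Nat.findGreatest (fun j => p.take j <:+ t) p.length

-- length of the longest proper border of q (the prefix-function value)
def brd (q : List Char) : Nat := Nat.findGreatest (fun k => q.take k <:+ q) (q.length - 1)

lemma okK_le (p t : List Char) : okK p t ≤ p.length := Nat.findGreatest_le _

lemma okK_suffix (p t : List Char) : p.take (okK p t) <:+ t := by
  have h := Nat.findGreatest_spec (P := fun j => p.take j <:+ t) (m := 0) (Nat.zero_le p.length)
    (by simp)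
  simpa [okK] using h

lemma okK_greatest {p t : List Char} {j : Nat} (h1 : j ≤ p.length) (h2 : p.take j <:+ t) :
    j ≤ okK p t := Nat.le_findGreatest h1 h2

lemma okK_eq {p t : List Char} {v : Nat} (h1 : v ≤ p.length) (h2 : p.take v <:+ t)
    (h3 : ∀ k, k ≤ p.length → p.take k <:+ t → k ≤ v) : okK p t = v :=
  le_antisymm (h3 _ (okK_le p t) (okK_suffix p t)) (okK_greatest h1 h2)

lemma brd_le (q : List Char) : brd q ≤ q.length - 1 := Nat.findGreatest_le _

lemma brd_suffix (q : List Char) : q.take (brd q) <:+ q := by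
  have h := Nat.findGreatest_spec (P := fun k => q.take k <:+ q) (m := 0) (Nat.zero_le (q.length-1))
    (by simp)
  simpa [brd] using h

lemma brd_greatest {q : List Char} {k : Nat} (h1 : k ≤ q.length - 1) (h2 : q.take k <:+ q) :
    k ≤ brd q := Nat.le_findGreatest h1 h2

lemma brd_eq {q : List Char} {v : Nat} (h1 : v ≤ q.length - 1) (h2 : q.take v <:+ q)
    (h3 : ∀ k, k ≤ q.length - 1 → q.take k <:+ q → k ≤ v) : brd q = v :=
  le_antisymm (h3 _ (brd_le q) (brd_suffix q)) (brd_greatest h1 h2)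

lemma suffix_of_suffix_le {l1 l2 t : List Char} (h1 : l1 <:+ t) (h2 : l2 <:+ t)
    (h : l1.length ≤ l2.length) : l1 <:+ l2 := by
  rcases List.suffix_or_suffix_of_suffix h1 h2 with h' | h'
  · exact h'
  · rw [h'.sublist.eq_of_length (le_antisymm h'.length_le h)]

lemma take_succ_getD {l : List Char} {i : Nat} (h : i < l.length) :
    l.take (i+1) = l.take i ++ [l.getD i ' '] := by
  rw [List.take_add_one]
  simp [List.getElem?_eq_getElem h]

-- p.take (j+1) is a suffix of t ++ [c] iff p.take j is a suffix of t and p[j] = c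
lemma take_suffix_concat {p t : List Char} {c : Char} {j : Nat} (hj : j < p.length) :
    p.take (j+1) <:+ t ++ [c] ↔ p.take j <:+ t ∧ p.getD j ' ' = c := by
  rw [take_succ_getD hj, ← List.reverse_prefix]
  simp only [List.reverse_append, List.reverse_cons, List.reverse_nil, List.nil_append,
    List.singleton_append]
  rw [List.cons_prefix_cons, List.reverse_prefix]
  tauto

lemma kmpWhile_spec (p : List Char) (pi : List Nat) (c : Char) :
    ∀ fuel j, j ≤ fuel → j ≤ p.length →
    (∀ k, k < j → pi.getD k 0 = brd (p.take (k+1))) →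
    (kmpWhile p pi c fuel j ≤ j ∧
     p.take (kmpWhile p pi c fuel j) <:+ p.take j ∧
     (kmpWhile p pi c fuel j = 0 ∨ c = p.getD (kmpWhile p pi c fuel j) ' ') ∧
     ∀ k, k ≤ j → p.take k <:+ p.take j → c = p.getD k ' ' → k ≤ kmpWhile p pi c fuel j) := by
  intro fuel
  induction fuel with
  | zero =>
    intro j hf _ _
    interval_cases j
    rw [kmpWhile]
    exact ⟨le_refl _, List.suffix_refl _, Or.inl rfl, fun k hk _ _ => hk⟩
  | succ fuel ih =>
    intro j hf hlen hpi
    rw [kmpWhile]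
    by_cases hcond : 0 < j ∧ c ≠ p.getD j ' '
    · rw [if_pos hcond]
      obtain ⟨hj0, hne⟩ := hcond
      have hq : (p.take j).length = j := by simp; omega
      have hpij : pi.getD (j-1) 0 = brd (p.take j) := by
        have := hpi (j-1) (by omega)
        rwa [show j - 1 + 1 = j from by omega] at this
      rw [hpij]
      set j' := brd (p.take j) with hj'def
      have hj'le : j' ≤ j - 1 := by
        have := brd_le (p.take j)
        omega
      have hsufj' : p.take j' <:+ p.take j := by
        have h1 := brd_suffix (p.take j)
        rwa [List.take_take, min_eq_left (by omega)] at h1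
      obtain ⟨ih1, ih2, ih3, ih4⟩ := ih j' (by omega) (by omega)
        (fun k hk => hpi k (by omega))
      refine ⟨by omega, ih2.trans hsufj', ih3, ?_⟩
      intro k hk hsuf hc
      have hkj : k ≠ j := by
        rintro rfl
        exact hne hc
      have hkb : k ≤ j' := brd_greatest (by omega)
        (by rwa [List.take_take, min_eq_left (by omega)])
      have hsuf' : p.take k <:+ p.take j' :=
        suffix_of_suffix_le hsuf hsufj' (by simp; omega)
      exact ih4 k hkb hsuf' hc
    · rw [if_neg hcond]
      push Not at hcond
      refine ⟨le_refl _, List.suffix_refl _, ?_, fun k hk _ _ => hk⟩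
      rcases Nat.eq_zero_or_pos j with h0 | h0
      · exact Or.inl h0
      · exact Or.inr (hcond h0)

lemma scan_step (p t : List Char) (c : Char) (pi : List Nat)
    (hpi : ∀ k, k < p.length → pi.getD k 0 = brd (p.take (k+1)))
    (ht : okK p t < p.length) :
    (if c = p.getD (kmpWhile p pi c (okK p t) (okK p t)) ' '
     then kmpWhile p pi c (okK p t) (okK p t) + 1
     else kmpWhile p pi c (okK p t) (okK p t)) = okK p (t ++ [c]) := by
  set j := okK p t with hjdef
  obtain ⟨w1, w2, w3, w4⟩ := kmpWhile_spec p pi c j j (le_refl _) (by omega)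
    (fun k hk => hpi k (by omega))
  set j1 := kmpWhile p pi c j j with hj1def
  have hsufj1 : p.take j1 <:+ t := w2.trans (okK_suffix p t)
  by_cases hc : c = p.getD j1 ' '
  · rw [if_pos hc]
    refine (okK_eq (by omega) ?_ ?_).symm
    · exact (take_suffix_concat (by omega)).mpr ⟨hsufj1, hc.symm⟩
    · intro k hk hsuf
      match k with
      | 0 => omega
      | m+1 =>
        obtain ⟨hmt, hmc⟩ := (take_suffix_concat (by omega)).mp hsuf
        have hmK : m ≤ j := okK_greatest (by omega) hmt
        have hmsuf : p.take m <:+ p.take j :=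
          suffix_of_suffix_le hmt (okK_suffix p t) (by simp; omega)
        have := w4 m hmK hmsuf hmc.symm
        omega
  · rw [if_neg hc]
    have hj10 : j1 = 0 := by
      rcases w3 with h | h
      · exact h
      · exact absurd h hc
    refine (okK_eq (by omega) (by simp [hj10]) ?_).symm
    intro k hk hsuf
    match k with
    | 0 => omega
    | m+1 =>
      obtain ⟨hmt, hmc⟩ := (take_suffix_concat (by omega)).mp hsuf
      have hmK : m ≤ j := okK_greatest (by omega) hmt
      have hmsuf : p.take m <:+ p.take j :=
        suffix_of_suffix_le hmt (okK_suffix p t) (by simp; omega)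
      have hm0 : m ≤ j1 := w4 m hmK hmsuf hmc.symm
      rw [hj10] at hm0
      interval_cases m
      exact absurd hmc.symm (by rwa [hj10] at hc)

lemma brd_step (p : List Char) (i : Nat) (pi : List Nat) (j : Nat)
    (h1 : 1 ≤ i) (h2 : i < p.length) (hj : j = brd (p.take i))
    (hpi : ∀ k, k < i → pi.getD k 0 = brd (p.take (k+1))) :
    ((if p.getD i ' ' = p.getD (kmpWhile p pi (p.getD i ' ') j j) ' '
      then kmpWhile p pi (p.getD i ' ') j j + 1
      else kmpWhile p pi (p.getD i ' ') j j) = brd (p.take (i+1)) ∧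
     (¬ p.getD i ' ' = p.getD (kmpWhile p pi (p.getD i ' ') j j) ' ' →
      kmpWhile p pi (p.getD i ' ') j j = 0)) := by
  set c := p.getD i ' ' with hcdef
  have hq : (p.take i).length = i := by simp; omega
  have hQ : (p.take (i+1)).length = i + 1 := by simp; omega
  have hjle : j ≤ i - 1 := by
    have := brd_le (p.take i)
    omega
  obtain ⟨w1, w2, w3, w4⟩ := kmpWhile_spec p pi c j j (le_refl _) (by omega)
    (fun k hk => hpi k (by omega))
  set j1 := kmpWhile p pi c j j with hj1def
  have hsufbrd : p.take j <:+ p.take i := by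
    have h1 := brd_suffix (p.take i)
    rw [List.take_take, min_eq_left (by omega)] at h1
    rwa [hj]
  have hsufj1 : p.take j1 <:+ p.take i := w2.trans hsufbrd
  have hsplit : p.take (i+1) = p.take i ++ [c] := take_succ_getD h2
  -- maximality of j1+1 (resp. 0) among borders of p.take (i+1)
  have hmax : ∀ k, k ≤ i → (p.take (i+1)).take k <:+ p.take (i+1) → (k = 0 ∨ ∃ m, k = m + 1 ∧ m ≤ j1) := by
    intro k hk hsuf
    match k with
    | 0 => exact Or.inl rfl
    | m+1 =>
      refine Or.inr ⟨m, rfl, ?_⟩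
      rw [List.take_take, min_eq_left (by omega), hsplit] at hsuf
      obtain ⟨hmt, hmc⟩ := (take_suffix_concat (by omega)).mp hsuf
      have hmb : m ≤ brd (p.take i) := brd_greatest (by omega)
        (by rwa [List.take_take, min_eq_left (by omega)])
      have hmsuf : p.take m <:+ p.take j :=
        suffix_of_suffix_le hmt hsufbrd (by simp; omega)
      exact w4 m (by omega) hmsuf hmc.symm
  by_cases hc : c = p.getD j1 ' '
  · rw [if_pos hc]
    refine ⟨(brd_eq (by omega) ?_ ?_).symm, fun h => absurd hc h⟩
    · rw [List.take_take, min_eq_left (by omega), hsplit]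
      exact (take_suffix_concat (by omega)).mpr ⟨w2.trans hsufbrd, hc.symm⟩
    · intro k hk hsuf
      rcases hmax k (by omega) hsuf with h | ⟨m, rfl, hm⟩
      · omega
      · omega
  · rw [if_neg hc]
    have hj10 : j1 = 0 := by
      rcases w3 with h | h
      · exact h
      · exact absurd h hc
    constructor
    · rw [hj10]
      refine (brd_eq (by omega) (by simp) ?_).symm
      intro k hk hsuf
      rcases hmax k (by omega) hsuf with h | ⟨m, rfl, hm⟩
      · omega
      · rw [hj10] at hm
        interval_cases m
        · exfalso
          rw [List.take_take, min_eq_left (by omega), hsplit] at hsuf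
          obtain ⟨hmt, hmc⟩ := (take_suffix_concat (by omega)).mp hsuf
          exact hc (by rw [hj10]; exact hmc.symm)
    · intro _
      exact hj10

lemma brd_short {q : List Char} (h : q.length ≤ 1) : brd q = 0 := by
  unfold brd
  rw [show q.length - 1 = 0 from by omega]
  rfl

lemma cp_fold (p : List Char) :
    ∀ (m i : Nat) (st : List Nat × Nat), 1 ≤ i → i + m = p.length →
    st.1.length = p.length → st.2 = brd (p.take i) →
    (∀ k, k < i → st.1.getD k 0 = brd (p.take (k+1))) →
    (((List.range' i m).foldl (fun (st : List Nat × Nat) i =>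
        let c := p.getD i ' '
        let j := kmpWhile p st.1 c st.2 st.2
        if c = p.getD j ' ' then (st.1.set i (j+1), j+1) else (st.1.set i 0, j)) st).1.length = p.length ∧
     ∀ k, k < i + m → ((List.range' i m).foldl (fun (st : List Nat × Nat) i =>
        let c := p.getD i ' '
        let j := kmpWhile p st.1 c st.2 st.2
        if c = p.getD j ' ' then (st.1.set i (j+1), j+1) else (st.1.set i 0, j)) st).1.getD k 0 = brd (p.take (k+1))) := by
  intro m
  induction m with
  | zero =>
    intro i st h1 h2 hlen hj hk
    simp only [List.range'_zero, List.foldl_nil]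
    exact ⟨hlen, fun k hk' => hk k (by omega)⟩
  | succ m ih =>
    intro i st h1 h2 hlen hj hk
    rw [List.range'_succ, List.foldl_cons]
    have hi : i < p.length := by omega
    obtain ⟨hb1, hb2⟩ := brd_step p i st.1 st.2 h1 hi hj hk
    set c := p.getD i ' ' with hc
    set j1 := kmpWhile p st.1 c st.2 st.2 with hj1
    have hgetset : ∀ (v : Nat) (k : Nat), k < p.length →
        (st.1.set i v).getD k 0 = if k = i then v else st.1.getD k 0 := by
      intro v k hkp
      rw [List.getD_eq_getElem _ _ (by rw [List.length_set, hlen]; exact hkp),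
        List.getElem_set]
      split
      · rename_i hik
        rw [if_pos hik.symm]
      · rename_i hik
        rw [if_neg (fun hh => hik hh.symm), List.getD_eq_getElem _ _ (by rw [hlen]; exact hkp)]
    by_cases hcc : c = p.getD j1 ' '
    · rw [if_pos hcc]
      obtain ⟨H1, H2⟩ := ih (i+1) (st.1.set i (j1+1), j1+1) (by omega) (by omega)
        (by rw [List.length_set]; exact hlen)
        (by show j1 + 1 = brd (p.take (i+1)); rw [← hb1, if_pos hcc])
        (by intro k hk'
            show (st.1.set i (j1+1)).getD k 0 = _
            rw [hgetset (j1+1) k (by omega)]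
            split
            · rename_i hik
              subst hik
              rw [← hb1, if_pos hcc]
            · exact hk k (by omega))
      exact ⟨H1, fun k hk' => H2 k (by omega)⟩
    · rw [if_neg hcc]
      obtain ⟨H1, H2⟩ := ih (i+1) (st.1.set i 0, j1) (by omega) (by omega)
        (by rw [List.length_set]; exact hlen)
        (by show j1 = brd (p.take (i+1)); rw [← hb1, if_neg hcc])
        (by intro k hk'
            show (st.1.set i 0).getD k 0 = _
            rw [hgetset 0 k (by omega)]
            split
            · rename_i hik
              subst hik
              rw [← hb1, if_neg hcc, hb2 hcc]
            · exact hk k (by omega))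
      exact ⟨H1, fun k hk' => H2 k (by omega)⟩

lemma cp_spec (p : List Char) :
    (compute_prefix p).length = p.length ∧
    ∀ k, k < p.length → (compute_prefix p).getD k 0 = brd (p.take (k+1)) := by
  rcases Nat.eq_zero_or_pos p.length with h0 | h0
  · have hp : p = [] := List.length_eq_zero_iff.mp h0
    subst hp
    simp [compute_prefix]
  · have hb1 : brd (p.take 1) = 0 := brd_short (by rw [List.length_take]; omega)
    obtain ⟨H1, H2⟩ := cp_fold p (p.length - 1) 1 (List.replicate p.length 0, 0) (le_refl _)
      (by omega) (by simp) (by exact hb1.symm)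
      (by intro k hk
          interval_cases k
          rw [List.getD_eq_getElem _ _ (by simpa using h0), List.getElem_replicate]
          exact hb1.symm)
    exact ⟨H1, fun k hk => H2 k (by omega)⟩

-- p occurs ending at position m of w iff it occurs starting at m - |p|
lemma occ_iff {w p : List Char} {s m : Nat} (hm : s + p.length = m) (hw : m ≤ w.length) :
    p <:+ w.take m ↔ p <+: w.drop s := by
  constructor
  · intro h
    have hlen : (w.take m).length = m := by simp; omega
    have := List.suffix_iff_eq_drop.mp h
    rw [hlen] at this
    have hdt : (w.take m).drop (m - p.length) = (w.drop (m - p.length)).take (m - (m - p.length)) :=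
      List.drop_take ..
    have hs : m - p.length = s := by omega
    rw [hdt, hs] at this
    rw [List.prefix_iff_eq_take, show p.length = m - s by omega]
    exact this
  · intro h
    have := List.prefix_iff_eq_take.mp h
    rw [this]
    have : (w.drop s).take p.length = (w.take (s + p.length)).drop s := by
      rw [List.drop_take]
      congr 1
      omega
    rw [this, hm]
    exact (w.take m).drop_suffix s

lemma w_getD {bl : List Char} {n i : Nat} (hn : bl.length = n) (_h0 : 0 < n) (h : i < 2*n) :
    (bl ++ bl).getD i ' ' = bl.getD (i % n) ' ' := by
  rcases Nat.lt_or_ge i n with h' | h'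
  · rw [List.getD_append _ _ _ _ (by omega), Nat.mod_eq_of_lt h']
  · rw [List.getD_append_right _ _ _ _ (by omega), hn]
    rw [show i % n = i - n from by rw [Nat.mod_eq_sub_mod h', Nat.mod_eq_of_lt (by omega)]]

-- A's scan, run to completion, computes the first-occurrence formula over bl ++ bl
lemma scan_run (p bl : List Char) (pi : List Nat) (n : Nat)
    (hn : p.length = n) (hbl : bl.length = n) (hpos : 0 < n) (hne : p ≠ bl)
    (hpi : ∀ k, k < n → pi.getD k 0 = brd (p.take (k+1))) :
    ∀ steps i j, i + steps = 2*n →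
      j = okK p ((bl ++ bl).take i) → j < n →
      (∀ s, s + n ≤ i → ¬ p <+: (bl ++ bl).drop s) →
      kmpScan p bl pi n steps i j =
        (if PySem.Chars.find (bl ++ bl) p = -1 then -1
         else PySem.Int.mod ((n:Int) - PySem.Chars.find (bl ++ bl) p) (n:Int)) := by
  have hw : (bl ++ bl).length = 2*n := by
    rw [List.length_append, hbl]
    omega
  intro steps
  induction steps with
  | zero =>
    intro i j hi hj hjn hinv
    rw [kmpScan]
    have hno : ∀ s, ¬ p <+: (bl ++ bl).drop s := by
      intro s hocc
      rcases Nat.lt_or_ge n s with hs | hs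
      · have hlen := hocc.length_le
        rw [List.length_drop, hw, hn] at hlen
        omega
      · exact hinv s (by omega) hocc
    have hfind : PySem.Chars.find (bl ++ bl) p = -1 := by
      rw [PySem.Chars.find_eq_neg_one_iff (bl ++ bl) p]
      intro hinf
      obtain ⟨s, hs⟩ := (PySem.Chars.exists_prefix_drop_iff_isIn p (bl ++ bl)).mpr
        ((PySem.Chars.isIn_iff_infix p (bl ++ bl)).mpr hinf)
      exact hno s hs
    rw [if_pos hfind]
  | succ steps ih =>
    intro i j hi hj hjn hinv
    have hilt : i < 2*n := by omega
    have hcw : bl.getD (i % n) ' ' = (bl ++ bl).getD i ' ' := (w_getD hbl hpos hilt).symm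
    have htake : (bl ++ bl).take (i+1) = (bl ++ bl).take i ++ [(bl ++ bl).getD i ' '] :=
      take_succ_getD (by omega)
    have hstep := scan_step p ((bl ++ bl).take i) ((bl ++ bl).getD i ' ') pi
      (by rw [hn]; exact hpi) (by rw [hn, ← hj]; exact hjn)
    set c := bl.getD (i % n) ' ' with hcdef
    set j1 := kmpWhile p pi c j j with hj1def
    set j2 := (if c = p.getD j1 ' ' then j1 + 1 else j1) with hj2def
    have hbody : kmpScan p bl pi n (steps+1) i j =
        if j2 = n then
          (if 0 ≤ (i:Int) - (n:Int) + 1 ∧ (i:Int) - (n:Int) + 1 < (n:Int)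
           then PySem.Int.mod ((n:Int) - ((i:Int) - (n:Int) + 1)) (n:Int)
           else kmpScan p bl pi n steps (i+1) j2)
        else kmpScan p bl pi n steps (i+1) j2 := rfl
    have hj2K : j2 = okK p ((bl ++ bl).take (i+1)) := by
      rw [hj2def, hj1def, hj, hcw, htake]
      exact hstep
    rw [hbody]
    by_cases hmatch : j2 = n
    · rw [if_pos hmatch]
      have hsuf : p <:+ (bl ++ bl).take (i+1) := by
        have h1 := okK_suffix p ((bl ++ bl).take (i+1))
        rw [← hj2K, hmatch, ← hn, List.take_length] at h1
        exact h1
      have hnle : n ≤ i + 1 := by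
        have h2 := hsuf.length_le
        rw [List.length_take, hn] at h2
        omega
      have hocc : p <+: (bl ++ bl).drop (i + 1 - n) :=
        (occ_iff (by omega) (by omega)).mp hsuf
      have hslt : i + 1 - n < n := by
        by_contra hcon
        have hsn : i + 1 - n = n := by omega
        apply hne
        rw [hsn, ← hbl, List.drop_left] at hocc
        exact hocc.eq_of_length (by rw [hn, hbl])
      have hinf : p <:+: (bl ++ bl) := hocc.isInfix.trans ((bl ++ bl).drop_suffix _).isInfix
      have hfge : 0 ≤ PySem.Chars.find (bl ++ bl) p := (PySem.Chars.find_nonneg_iff (bl ++ bl) p).mpr hinf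
      obtain ⟨hfocc, hfmin⟩ := PySem.Chars.find_spec hfge
      have hftn : (PySem.Chars.find (bl ++ bl) p).toNat = i + 1 - n := by
        rcases lt_trichotomy (PySem.Chars.find (bl ++ bl) p).toNat (i + 1 - n) with h | h | h
        · exact absurd hfocc (hinv _ (by omega))
        · exact h
        · exact absurd hocc (hfmin _ h)
      have hfval : PySem.Chars.find (bl ++ bl) p = ((i + 1 - n : Nat) : Int) := by
        rw [← hftn]
        exact (Int.toNat_of_nonneg hfge).symm
      have hne1 : PySem.Chars.find (bl ++ bl) p ≠ -1 := by
        rw [hfval]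
        omega
      rw [if_neg hne1, if_pos (by constructor <;> omega)]
      rw [hfval]
      congr 1
      omega
    · rw [if_neg hmatch]
      have hj2lt : j2 < n := by
        have h2 := okK_le p ((bl ++ bl).take (i+1))
        rw [← hj2K, hn] at h2
        omega
      refine ih (i+1) j2 (by omega) hj2K hj2lt ?_
      intro s hs hocc
      rcases Nat.lt_or_ge (s + n) (i + 1) with hs' | hs'
      · exact hinv s (by omega) hocc
      · have hseq : s + n = i + 1 := by omega
        have hsuf : p <:+ (bl ++ bl).take (i+1) :=
          (occ_iff (show s + p.length = i + 1 from by omega) (by omega)).mpr hocc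
        have hKn : n ≤ okK p ((bl ++ bl).take (i+1)) :=
          okK_greatest (by omega) (by rw [← hn, List.take_length]; exact hsuf)
        omega

lemma okK_nil {p : List Char} (hp : 0 < p.length) : okK p [] = 0 := by
  refine okK_eq (by omega) (by simp) ?_
  intro k hk hsuf
  have := List.suffix_nil.mp hsuf
  rcases List.take_eq_nil_iff.mp this with h | h
  · omega
  · rw [h] at hp
    simp at hp

-- B's rotation test at s equals 'a occurs at index s of bl ++ bl'
lemma rot_iff {al bl : List Char} {n s : Nat} (hla : al.length = n) (hlb : bl.length = n)
    (hpos : 0 < n) (hs : s < n) :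
    ((List.range n).all (fun t => al.getD t ' ' == bl.getD ((s + t) % n) ' ') = true) ↔
      al <+: (bl ++ bl).drop s := by
  have hw : (bl ++ bl).length = 2*n := by rw [List.length_append]; omega
  have hkey : ∀ t, t < n →
      ((al.getD t ' ' == bl.getD ((s + t) % n) ' ') = true ↔
       ∀ (h1 : t < al.length) (h2 : t < (((bl ++ bl).drop s).take al.length).length),
         al[t] = (((bl ++ bl).drop s).take al.length)[t]) := by
    intro t ht
    have hst : s + t < 2*n := by omega
    have hgd := w_getD (n := n) (i := s + t) hlb hpos hst
    rw [List.getD_eq_getElem _ _ (by omega),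
      List.getD_eq_getElem _ _ (by rw [hlb]; exact Nat.mod_lt _ hpos)] at hgd
    rw [beq_iff_eq, List.getD_eq_getElem _ _ (by omega),
      List.getD_eq_getElem _ _ (by rw [hlb]; exact Nat.mod_lt _ hpos)]
    constructor
    · intro h h1 h2
      rw [List.getElem_take, List.getElem_drop, ← hgd] at *
      exact h
    · intro h
      have h2 : t < (((bl ++ bl).drop s).take al.length).length := by
        rw [List.length_take, List.length_drop, hw]; omega
      have := h (by omega) h2
      rw [List.getElem_take, List.getElem_drop] at this
      rw [← hgd]
      exact this
  rw [List.all_eq_true, List.prefix_iff_eq_take]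
  constructor
  · intro h
    apply List.ext_getElem
    · rw [hla, List.length_take, List.length_drop, hw]; omega
    · intro t h1 h2
      exact (hkey t (by omega)).mp (h t (by simpa [hla] using h1)) h1 h2
  · intro h t htmem
    have ht : t < n := by simpa using htmem
    refine (hkey t ht).mpr ?_
    intro h1 h2
    exact List.getElem_of_eq h h1

lemma rotLoop_none (al bl : List Char) (n : Nat) (hla : al.length = n) (hlb : bl.length = n)
    (hpos : 0 < n) :
    ∀ fuel s, fuel + s = n →
      (∀ t, s ≤ t → t < n → ¬ al <+: (bl ++ bl).drop t) →
      rotLoop al bl n fuel s = -1 := by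
  intro fuel
  induction fuel with
  | zero => intro s _ _; rw [rotLoop]
  | succ fuel ih =>
    intro s hfs hno
    rw [rotLoop]
    rw [if_neg (fun h => hno s (le_refl _) (by omega) ((rot_iff hla hlb hpos (by omega)).mp h))]
    exact ih (s+1) (by omega) (fun t ht1 ht2 => hno t (by omega) ht2)

lemma rotLoop_finds (al bl : List Char) (n : Nat) (hla : al.length = n) (hlb : bl.length = n) :
    ∀ fuel s s0, fuel + s = n → s ≤ s0 → s0 < n →
      al <+: (bl ++ bl).drop s0 →
      (∀ t, t < s0 → ¬ al <+: (bl ++ bl).drop t) →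
      rotLoop al bl n fuel s = PySem.Int.mod ((n : Int) - (s0 : Int)) (n : Int) := by
  intro fuel
  induction fuel with
  | zero => intro s s0 hfs hs hs0 _ _; omega
  | succ fuel ih =>
    intro s s0 hfs hs hs0 hocc hmin
    rw [rotLoop]
    by_cases heq : s = s0
    · subst heq
      rw [if_pos ((rot_iff hla hlb (by omega) hs0).mpr hocc)]
    · rw [if_neg (fun h => hmin s (by omega) ((rot_iff hla hlb (by omega) (by omega)).mp h))]
      exact ih (s+1) s0 (by omega) (by omega) hs0 hocc hmin

-- ===== VERDICT (by name: the statement is the Claim_ definition above) =====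
theorem find_cyclic_shift_spec : Claim_equal_find_cyclic_shift := by
  intro a b _
  unfold Spec_find_cyclic_shift find_cyclic_shift find_cyclic_shift_alt
  simp only
  set al := a.toList with hal
  set bl := b.toList with hbl
  by_cases hlen : al.length ≠ bl.length
  · rw [if_pos hlen, if_pos hlen]
  · rw [if_neg hlen, if_neg hlen]
    push Not at hlen
    by_cases hz : al.length = 0
    · rw [if_pos hz, if_pos hz]
    · rw [if_neg hz, if_neg hz]
      set n := al.length with hn
      have hpos : 0 < n := Nat.pos_of_ne_zero hz
      by_cases heq : al = bl
      · -- A returns 0; B's loop matches at s = 0 and returns (n - 0) % n = 0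
        rw [if_pos heq]
        have hocc0 : al <+: (bl ++ bl).drop 0 := by
          rw [List.drop_zero, ← heq]
          exact al.prefix_append al
        rw [rotLoop_finds al bl n rfl hlen.symm n 0 0 (by omega) (le_refl _) hpos hocc0
          (fun t ht => absurd ht (by omega))]
        rw [Nat.cast_zero, sub_zero,
          PySem.Int.mod_eq_emod_of_pos (by exact_mod_cast hpos), Int.emod_self]
      · rw [if_neg heq]
        obtain ⟨hcp1, hcp2⟩ := cp_spec al
        rw [scan_run al bl (compute_prefix al) n rfl hlen.symm hpos heq hcp2 (2 * n) 0 0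
          (by omega) (by rw [List.take_zero, okK_nil hpos]) hpos
          (fun s hs => absurd hs (by omega))]
        by_cases hfind : PySem.Chars.find (bl ++ bl) al = -1
        · rw [if_pos hfind]
          refine (rotLoop_none al bl n rfl hlen.symm hpos n 0 (by omega) ?_).symm
          intro t _ _ hocc
          rw [PySem.Chars.find_eq_neg_one_iff (bl ++ bl) al] at hfind
          exact hfind (hocc.isInfix.trans ((bl ++ bl).drop_suffix _).isInfix)
        · rw [if_neg hfind]
          have hfge : 0 ≤ PySem.Chars.find (bl ++ bl) al := by
            have := PySem.Chars.neg_one_le_find (bl ++ bl) al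
            omega
          obtain ⟨hfocc, hfmin⟩ := PySem.Chars.find_spec hfge
          set s0 := (PySem.Chars.find (bl ++ bl) al).toNat with hs0
          have hs0le : s0 ≤ n := by
            have hlen2 := hfocc.length_le
            rw [List.length_drop, List.length_append, ← hlen] at hlen2
            omega
          have hs0lt : s0 < n := by
            rcases Nat.lt_or_ge s0 n with h | h
            · exact h
            · exfalso
              have hsn : s0 = n := by omega
              apply heq
              rw [hsn, hlen] at hfocc
              rw [List.drop_left] at hfocc
              exact hfocc.eq_of_length hlen
          rw [rotLoop_finds al bl n rfl hlen.symm n 0 s0 (by omega) (by omega) hs0lt hfocc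
            (fun t ht => hfmin t ht)]
          congr 2
          rw [hs0, Int.toNat_of_nonneg hfge]
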